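-- pv_equiv track=rewrite | github.com/fbulow/advent_of_code_2020 | 2021/3/main.py | epsilon
-- ===== SOURCE A (Python) =====
-- def count(data, pos, val):
--     return sum(int(x[pos]==val) for x in data)
--
-- def gamma(data):
--     ret=""
--     for col in range(len(data[0])-1):
--         zero = count(data, col, '0')
--         one = count(data, col, '1')
--         if zero>=one:
--            ret+='0'
--         else:
--            ret+='1'
--     return ret
--
-- def epsilon(data):
--     ret = ''
--     for x in gamma(data):
--         if x=='1':
--             ret+='0'
--         elif x=='0':
--             ret+='1'
--     return ret
-- ===== SOURCE B (Python) =====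
-- def epsilon(data):
--     # One row-major pass: keep a per-column balance (zeros minus ones,
--     # other characters contribute 0), then render '1' where balance >= 0.
--     bal = [0] * (len(data[0]) - 1)
--     for row in data:
--         bal = [b + (1 if row[c] == '0' else -1 if row[c] == '1' else 0)
--                for c, b in enumerate(bal)]
--     return ''.join('1' if b >= 0 else '0' for b in bal)
-- ===== Notes on version B (the rewrite author's own statement) =====
-- stated objective: alternative
-- what changed: Replaced A's column-major two-phase scheme (for each column, scan the whole data twice counting '0's and '1's to build gamma, then re-scan gamma flipping bits) with a single row-major pass that maintains a per-column signed balance vector (zeros minus ones), functionally updated once per row, and renders '1' where the balance is >= 0.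
-- outside the precondition, e.g. on epsilon([]): A raises IndexError, B raises IndexError; on epsilon(['01', '']): A raises IndexError, B raises IndexError
import Mathlib
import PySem

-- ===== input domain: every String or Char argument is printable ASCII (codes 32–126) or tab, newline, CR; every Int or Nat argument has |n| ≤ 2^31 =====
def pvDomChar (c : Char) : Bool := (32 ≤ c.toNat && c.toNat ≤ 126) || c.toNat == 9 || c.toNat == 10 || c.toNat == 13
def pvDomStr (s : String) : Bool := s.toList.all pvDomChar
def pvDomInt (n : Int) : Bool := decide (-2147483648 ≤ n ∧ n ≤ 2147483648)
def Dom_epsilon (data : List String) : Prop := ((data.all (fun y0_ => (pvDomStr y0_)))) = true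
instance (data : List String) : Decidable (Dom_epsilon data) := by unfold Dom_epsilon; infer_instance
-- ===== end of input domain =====

-- B replaces A's column-major gamma-then-complement scheme by one row-major pass over data
-- maintaining a per-column balance vector (zeros minus ones); alternative decomposition, same cost.

-- ===== PORT A =====
def pvCount (data : List String) (pos : Int) (val : Char) : Int :=
  data.foldl (fun acc x => acc + (if PySem.Str.pyGet? x pos = some val then 1 else 0)) 0

def pvGamma (data : List String) : String :=
  (PySem.List.pyRange 0 ((data.headI.length : Int) - 1) 1).foldl
    (fun ret col =>
      if pvCount data col '0' ≥ pvCount data col '1' then ret ++ "0" else ret ++ "1") ""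

def epsilon (data : List String) : String :=
  (pvGamma data).toList.foldl
    (fun ret x => if x = '1' then ret ++ "0" else if x = '0' then ret ++ "1" else ret) ""

-- ===== PORT B =====
-- per-row contribution of one character position: '0' adds 1, '1' subtracts 1, else 0
def pvDelta (o : Option Char) : Int :=
  if o = some '0' then 1 else if o = some '1' then -1 else 0

def epsilon_alt (data : List String) : String :=
  let bal :=
    data.foldl
      (fun bal row =>
        (PySem.List.enumerate bal).map (fun cb => cb.2 + pvDelta (PySem.Str.pyGet? row cb.1)))
      (List.replicate (data.headI.length - 1) (0 : Int))
  PySem.Str.join "" (bal.map (fun b => if b ≥ 0 then "1" else "0"))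

-- ===== PRECONDITION & SPEC =====
-- Pre_ excludes exactly the inputs where Python A raises: empty data (data[0] IndexError)
-- and rows shorter than len(data[0])-1 (x[pos] IndexError).
def Pre_epsilon (data : List String) : Prop :=
  data ≠ [] ∧ ∀ x ∈ data, data.headI.length - 1 ≤ x.length
instance (data : List String) : Decidable (Pre_epsilon data) := by unfold Pre_epsilon; infer_instance
def pvWitness_epsilon : List String := ["0101", "1110", "1011"]

def Spec_epsilon (data : List String) (out : String) : Prop := out = epsilon_alt data
instance (data : List String) (out : String) : Decidable (Spec_epsilon data out) := by unfold Spec_epsilon; infer_instance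

-- ===== CLAIM (what is proved, stated in full; the proofs are below) =====
def Claim_equal_epsilon : Prop := ∀ (data : List String), Dom_epsilon data → Pre_epsilon data → Spec_epsilon data (epsilon data)

-- ===== LEMMAS AND PROOFS =====

-- abbreviation for the per-column 0/1 counts
def pvZ (data : List String) (c : Int) : Int :=
  (data.countP (fun row => PySem.Str.pyGet? row c == some '0') : Int)
def pvO (data : List String) (c : Int) : Int :=
  (data.countP (fun row => PySem.Str.pyGet? row c == some '1') : Int)

theorem count_aux (c : Int) (v : Char) : ∀ (l : List String) (a : Int),
    l.foldl (fun acc x => acc + (if PySem.Str.pyGet? x c = some v then 1 else 0)) a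
      = a + ((l.countP (fun row => PySem.Str.pyGet? row c == some v)) : Int)
  | [], a => by simp
  | x :: l, a => by
    rw [List.foldl_cons, count_aux c v l, List.countP_cons]
    by_cases h : PySem.Str.pyGet? x c = some v
    · simp only [h, if_true, beq_self_eq_true]
      push_cast; ring
    · rw [if_neg h, beq_eq_false_iff_ne.mpr h]
      push_cast; ring

theorem pvCount_eq (data : List String) (c : Int) :
    (pvCount data c '0' = pvZ data c) ∧ (pvCount data c '1' = pvO data c) := by
  constructor <;> simp only [pvCount, pvZ, pvO] <;> rw [count_aux] <;> ring

theorem intersperse_nil_flatten {α : Type} (l : List (List α)) :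
    (List.intersperse [] l).flatten = l.flatten := by
  induction l with
  | nil => rfl
  | cons a r ih =>
    cases r with
    | nil => simp
    | cons b t => simp_all [List.intersperse]

theorem chars_join_nil (l : List (List Char)) :
    PySem.Chars.join [] l = l.flatten := by
  simp [PySem.Chars.join, List.intercalate, intersperse_nil_flatten]

theorem gamma_fold (cond : Int → Prop) [DecidablePred cond] : ∀ (l : List Int) (s : String),
    (l.foldl (fun ret col => if cond col then ret ++ "0" else ret ++ "1") s).toList
      = s.toList ++ (l.map (fun c => if cond c then ['0'] else ['1'])).flatten
  | [], s => by simp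
  | a :: l, s => by
    rw [List.foldl_cons]
    by_cases h : cond a <;>
      simp [h, gamma_fold cond l, String.toList_append]

theorem comp_fold (cond : Int → Prop) [DecidablePred cond] : ∀ (l : List Int) (s : String),
    (((l.map (fun c => if cond c then ['0'] else ['1'])).flatten).foldl
        (fun ret x => if x = '1' then ret ++ "0" else if x = '0' then ret ++ "1" else ret) s).toList
      = s.toList ++ (l.map (fun c => if cond c then ['1'] else ['0'])).flatten
  | [], s => by simp
  | a :: l, s => by
    by_cases h : cond a <;>
      simp only [List.map_cons, List.flatten_cons, h, if_true, if_false, List.foldl_append,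
        List.foldl_cons, List.foldl_nil] <;>
      norm_num [comp_fold cond l, String.toList_append] <;>
      simp [show ('0' : Char) ≠ '1' by decide]

-- A's characters: one per column of pyRange 0 (len-1) 1, '1' iff zeros ≥ ones
theorem epsilon_chars (data : List String) :
    (epsilon data).toList
      = ((PySem.List.pyRange 0 ((data.headI.length : Int) - 1) 1).map
          (fun c => if pvZ data c ≥ pvO data c then ['1'] else ['0'])).flatten := by
  unfold epsilon pvGamma
  simp only [fun c => (pvCount_eq data c).1, fun c => (pvCount_eq data c).2]
  rw [gamma_fold (fun c => pvZ data c ≥ pvO data c)]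
  simp only [String.toList_empty, List.nil_append]
  rw [comp_fold (fun c => pvZ data c ≥ pvO data c)]
  simp

-- one row's functional update, on a balance vector presented as a map over the range
theorem pyRange_zero_max (w : Int) :
    PySem.List.pyRange 0 (max w 0) 1 = PySem.List.pyRange 0 w 1 := by
  by_cases h : 0 ≤ w
  · rw [max_eq_left h]
  · rw [max_eq_right (by omega), PySem.List.pyRange_one_eq_nil le_rfl,
        PySem.List.pyRange_one_eq_nil (by omega)]

theorem step_map (w : Int) (g : Int → Int) (row : String) :
    (PySem.List.enumerate ((PySem.List.pyRange 0 w 1).map g)).map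
        (fun cb => cb.2 + pvDelta (PySem.Str.pyGet? row cb.1))
      = (PySem.List.pyRange 0 w 1).map (fun c => g c + pvDelta (PySem.Str.pyGet? row c)) := by
  rw [PySem.List.enumerate_eq_map_pyRange (d := (0 : Int))]
  have hlen : ((((PySem.List.pyRange 0 w 1).map g).length : Int)) = max w 0 := by
    rw [List.length_map, PySem.List.length_pyRange_one]
    omega
  rw [List.map_map]
  simp only [PySem.List.len_eq, hlen, pyRange_zero_max]
  apply List.map_congr_left
  intro j hj
  rw [PySem.List.mem_pyRange_one] at hj
  simp only [Function.comp_def]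
  rw [PySem.List.pyGetD_map_pyRange_of_nonneg g w j (0 : Int) hj.1 hj.2]

-- balance after the fold over all rows
theorem fold_bal (w : Int) : ∀ (l : List String) (g : Int → Int),
    l.foldl
      (fun bal row =>
        (PySem.List.enumerate bal).map (fun cb => cb.2 + pvDelta (PySem.Str.pyGet? row cb.1)))
      ((PySem.List.pyRange 0 w 1).map g)
    = (PySem.List.pyRange 0 w 1).map (fun c => g c + (pvZ l c - pvO l c))
  | [], g => by simp [pvZ, pvO]
  | row :: l, g => by
    rw [List.foldl_cons, step_map, fold_bal w l]
    apply List.map_congr_left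
    intro c _
    simp only [pvZ, pvO, pvDelta, List.countP_cons]
    rcases h : PySem.Str.pyGet? row c with _ | ch
    · simp
    · by_cases h0 : ch = '0'
      · subst h0; norm_num; ring
      · by_cases h1 : ch = '1'
        · subst h1; norm_num; push_cast; ring
        · simp [h0, h1]

-- ===== VERDICT (by name: the statement is the Claim_ definition above) =====
theorem epsilon_spec : Claim_equal_epsilon := by
  intro data _ _
  unfold Spec_epsilon
  apply String.toList_injective
  rw [epsilon_chars]
  unfold epsilon_alt
  have hrep : List.replicate (data.headI.length - 1) (0 : Int)
      = (PySem.List.pyRange 0 ((data.headI.length : Int) - 1) 1).map (fun _ => 0) := by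
    rw [List.map_const']
    congr 1
    rw [PySem.List.length_pyRange_one]
    omega
  rw [hrep, fold_bal]
  simp [PySem.Str.join, chars_join_nil, List.map_map, Function.comp_def,
    apply_ite String.toList, ge_iff_le, pvZ, pvO]
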